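-- pv_equiv track=rewrite | github.com/NeelM0906/sigil-runtime | src/bomba_sr/search/agentic_search.py | _matches_types
-- ===== SOURCE A (Python) =====
-- import fnmatch
--
-- def _matches_types(filename: str, file_types: list[str]) -> bool:
--     ext = filename.rsplit(".", 1)
--     if len(ext) != 2:
--         return False
--     suffix = ext[1].lower()
--     for ft in file_types:
--         normalized = ft.lower().lstrip(".")
--         if suffix == normalized:
--             return True
--         # Handle ripgrep aliases that map to many file patterns.
--         if normalized == "py" and fnmatch.fnmatch(filename.lower(), "*.py"):
--             return True
--         if normalized in {"ts", "tsx"} and filename.lower().endswith((".ts", ".tsx")):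
--             return True
--         if normalized in {"js", "jsx"} and filename.lower().endswith((".js", ".jsx")):
--             return True
--         if normalized == "md" and filename.lower().endswith(".md"):
--             return True
--     return False
-- ===== SOURCE B (Python) =====
-- def _matches_types(filename: str, file_types: list[str]) -> bool:
--     parts = filename.rsplit(".", 1)
--     if len(parts) != 2:
--         return False
--     suffix = parts[1].lower()
--     allowed = set()
--     for ft in file_types:
--         n = ft.lower().lstrip(".")
--         allowed.add(n)
--         if n in ("ts", "tsx"):
--             allowed.update(("ts", "tsx"))
--         elif n in ("js", "jsx"):
--             allowed.update(("js", "jsx"))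
--     return suffix in allowed
-- ===== Notes on version B (the rewrite author's own statement) =====
-- stated objective: simpler
-- what changed: B precomputes one set of accepted suffixes (normalizing each file type and expanding the ts/tsx and js/jsx aliases while building it) and decides by a single membership test, instead of A's per-element five-branch cascade with early returns and repeated endswith/fnmatch checks against the whole filename.
import Mathlib
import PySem

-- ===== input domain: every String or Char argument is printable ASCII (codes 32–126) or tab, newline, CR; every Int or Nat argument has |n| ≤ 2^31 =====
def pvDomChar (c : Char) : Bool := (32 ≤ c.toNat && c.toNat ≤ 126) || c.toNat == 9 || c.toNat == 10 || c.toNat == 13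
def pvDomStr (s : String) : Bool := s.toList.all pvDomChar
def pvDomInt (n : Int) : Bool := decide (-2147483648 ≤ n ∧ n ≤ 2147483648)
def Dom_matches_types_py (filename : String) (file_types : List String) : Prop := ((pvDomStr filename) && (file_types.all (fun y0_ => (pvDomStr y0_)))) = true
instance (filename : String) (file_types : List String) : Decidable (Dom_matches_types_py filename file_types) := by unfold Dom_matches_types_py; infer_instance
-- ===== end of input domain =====

-- B replaces A's per-element branch cascade with early returns by ONE pre-built set of
-- accepted suffixes (one pass over file_types) followed by a single membership test.

-- Shared helper: filename.rsplit(".", 1), hand-ported (PySem has no rsplit); exact for maxsplit=1.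
-- splitLastDot cs = some (h, t) iff cs = h ++ '.' :: t with t dot-free (split at the LAST '.').
def splitLastDot : List Char → Option (List Char × List Char)
  | [] => none
  | c :: rest =>
    match splitLastDot rest with
    | some (h, t) => some (c :: h, t)
    | none => if c = '.' then some ([], rest) else none

def pyRsplitDot1 (cs : List Char) : List (List Char) :=
  match splitLastDot cs with
  | some (h, t) => [h, t]
  | none => [cs]

-- ===== PORT A =====
-- A's for-loop; `fl` is filename.toList (A recomputes filename.lower() in each branch, ported
-- as the same expression each time). fnmatch.fnmatch(x, "*.py") is ported as
-- x.endswith(".py"): for this fixed pattern fnmatch is exactly that (POSIX normcase = identity).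
def aLoop (fl : List Char) (suffix : List Char) : List String → Bool
  | [] => false
  | ft :: rest =>
    let normalized := (PySem.Chars.lower ft.toList).dropWhile (· == '.')  -- ft.lower().lstrip(".")
    if suffix == normalized then true
    else if normalized == "py".toList && PySem.Chars.endswith (PySem.Chars.lower fl) ".py".toList then true
    else if (normalized == "ts".toList || normalized == "tsx".toList)
            && (PySem.Chars.endswith (PySem.Chars.lower fl) ".ts".toList
                || PySem.Chars.endswith (PySem.Chars.lower fl) ".tsx".toList) then true
    else if (normalized == "js".toList || normalized == "jsx".toList)
            && (PySem.Chars.endswith (PySem.Chars.lower fl) ".js".toList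
                || PySem.Chars.endswith (PySem.Chars.lower fl) ".jsx".toList) then true
    else if normalized == "md".toList && PySem.Chars.endswith (PySem.Chars.lower fl) ".md".toList then true
    else aLoop fl suffix rest

def matches_types_py (filename : String) (file_types : List String) : Bool :=
  let ext := pyRsplitDot1 filename.toList
  if ext.length ≠ 2 then false
  else
    let suffix := PySem.Chars.lower (ext.getD 1 [])
    aLoop filename.toList suffix file_types

-- ===== PORT B =====
-- loop body: record ft's accepted suffixes in the set
def addEntries (s : PySem.Set (List Char)) (ft : String) : PySem.Set (List Char) :=
  let n := (PySem.Chars.lower ft.toList).dropWhile (· == '.')  -- ft.lower().lstrip(".")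
  let s := PySem.Set.add s n
  if n == "ts".toList || n == "tsx".toList then
    PySem.Set.add (PySem.Set.add s "ts".toList) "tsx".toList
  else if n == "js".toList || n == "jsx".toList then
    PySem.Set.add (PySem.Set.add s "js".toList) "jsx".toList
  else s

def matches_types_py_alt (filename : String) (file_types : List String) : Bool :=
  let parts := pyRsplitDot1 filename.toList
  if parts.length ≠ 2 then false
  else
    let suffix := PySem.Chars.lower (parts.getD 1 [])
    PySem.Set.contains (file_types.foldl addEntries PySem.Set.empty) suffix

-- ===== PRECONDITION & SPEC =====
def Spec_matches_types_py (filename : String) (file_types : List String) (out : Bool) : Prop := out = matches_types_py_alt filename file_types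
instance (filename : String) (file_types : List String) (out : Bool) : Decidable (Spec_matches_types_py filename file_types out) := by unfold Spec_matches_types_py; infer_instance

-- ===== CLAIM (what is proved, stated in full; the proofs are below) =====
def Claim_equal_matches_types_py : Prop := ∀ (filename : String) (file_types : List String), Dom_matches_types_py filename file_types → Spec_matches_types_py filename file_types (matches_types_py filename file_types)

-- ===== LEMMAS AND PROOFS =====

theorem splitLastDot_none (cs : List Char) (hs : splitLastDot cs = none) : '.' ∉ cs := by
  induction cs with
  | nil => simp
  | cons c rest ih =>
    simp only [splitLastDot] at hs
    cases hr : splitLastDot rest with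
    | some p => rw [hr] at hs; simp at hs
    | none =>
      rw [hr] at hs
      by_cases hc : c = '.'
      · simp [hc] at hs
      · intro hm
        rcases List.mem_cons.mp hm with rfl | hm'
        · exact hc rfl
        · exact ih hr hm'

theorem splitLastDot_spec (cs h t : List Char) (hs : splitLastDot cs = some (h, t)) :
    cs = h ++ '.' :: t ∧ '.' ∉ t := by
  induction cs generalizing h t with
  | nil => simp [splitLastDot] at hs
  | cons c rest ih =>
    simp only [splitLastDot] at hs
    cases hr : splitLastDot rest with
    | some p =>
      obtain ⟨h', t'⟩ := p
      rw [hr] at hs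
      simp only [Option.some.injEq, Prod.mk.injEq] at hs
      rcases hs with ⟨rfl, rfl⟩
      obtain ⟨hcs, hnd⟩ := ih h' t' hr
      exact ⟨by simp [hcs], hnd⟩
    | none =>
      rw [hr] at hs
      by_cases hc : c = '.'
      · rw [if_pos hc] at hs
        simp only [Option.some.injEq, Prod.mk.injEq] at hs
        rcases hs with ⟨rfl, rfl⟩
        exact ⟨by simp [hc], splitLastDot_none rest hr⟩
      · simp [hc] at hs

theorem suffix_dot_iff (X T p : List Char) (hT : '.' ∉ T) (hp : '.' ∉ p) :
    ('.' :: p) <:+ (X ++ '.' :: T) ↔ p = T := by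
  induction X with
  | nil =>
    simp only [List.nil_append, List.suffix_cons_iff]
    constructor
    · rintro (h | h)
      · exact (List.cons.injEq _ _ _ _ ▸ h).2
      · exact absurd (h.subset (List.mem_cons_self)) hT
    · rintro rfl; exact Or.inl rfl
  | cons x X ih =>
    rw [List.cons_append, List.suffix_cons_iff]
    constructor
    · rintro (h | h)
      · injection h with h1 h2
        exact absurd (h2 ▸ List.mem_append_right X (List.mem_cons_self)) hp
      · exact ih.mp h
    · intro h; exact Or.inr (ih.mpr h)

theorem charOfNat_toNat (n : Nat) (h : Nat.isValidChar n) : (Char.ofNat n).toNat = n := by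
  unfold Char.ofNat Char.toNat
  simp [Char.ofNatAux, h]

theorem lowerChar_dot_iff (c : Char) : PySem.Chars.lowerChar c = '.' ↔ c = '.' := by
  constructor
  · intro h
    unfold PySem.Chars.lowerChar at h
    split at h
    · rename_i hup
      simp only [PySem.Chars.isupper, Bool.and_eq_true, decide_eq_true_eq] at hup
      exfalso
      have h1 : (65 : Nat) ≤ c.toNat := hup.1
      have h2 : c.toNat ≤ 90 := hup.2
      have hv : (Char.ofNat (c.toNat + 32)).toNat = c.toNat + 32 :=
        charOfNat_toNat _ (Or.inl (by omega))
      rw [h] at hv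
      have : ('.' : Char).toNat = 46 := by decide
      omega
    · exact h
  · intro h; subst h; decide

theorem not_dot_mem_lower (T : List Char) (hT : '.' ∉ T) : '.' ∉ PySem.Chars.lower T := by
  unfold PySem.Chars.lower
  simp only [List.mem_map, not_exists, not_and]
  intro c hc he
  exact hT ((lowerChar_dot_iff c).mp he ▸ hc)

theorem lower_split (X T : List Char) :
    PySem.Chars.lower (X ++ '.' :: T) = PySem.Chars.lower X ++ '.' :: PySem.Chars.lower T := by
  unfold PySem.Chars.lower
  simp
  decide

-- endswith on the lowered filename, rewritten in terms of the lowered last-dot suffix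
theorem endswith_lower (X T p : List Char) (hT : '.' ∉ T) (hp : '.' ∉ p) :
    PySem.Chars.endswith (PySem.Chars.lower (X ++ '.' :: T)) ('.' :: p)
      = (p == PySem.Chars.lower T) := by
  rw [Bool.eq_iff_iff, PySem.Chars.endswith_iff, beq_iff_eq, lower_split]
  exact suffix_dot_iff _ _ _ (not_dot_mem_lower T hT) hp

-- A's acceptance test for one element, as a plain disjunction over the suffix
def elemCond (suffix n : List Char) : Bool :=
  (suffix == n)
  || ((n == "py".toList) && (suffix == "py".toList))
  || ((n == "ts".toList || n == "tsx".toList) && (suffix == "ts".toList || suffix == "tsx".toList))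
  || ((n == "js".toList || n == "jsx".toList) && (suffix == "js".toList || suffix == "jsx".toList))
  || ((n == "md".toList) && (suffix == "md".toList))

theorem if_bool_or (c x : Bool) : (if c = true then true else x) = (c || x) := by
  cases c <;> simp

theorem aLoop_cons (X T suffix : List Char) (hT : '.' ∉ T)
    (hsuf : suffix = PySem.Chars.lower T) (ft : String) (rest : List String) :
    aLoop (X ++ '.' :: T) suffix (ft :: rest)
      = (elemCond suffix ((PySem.Chars.lower ft.toList).dropWhile (· == '.'))
          || aLoop (X ++ '.' :: T) suffix rest) := by
  have hpy := endswith_lower X T "py".toList hT (by decide)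
  have hts := endswith_lower X T "ts".toList hT (by decide)
  have htsx := endswith_lower X T "tsx".toList hT (by decide)
  have hjs := endswith_lower X T "js".toList hT (by decide)
  have hjsx := endswith_lower X T "jsx".toList hT (by decide)
  have hmd := endswith_lower X T "md".toList hT (by decide)
  have hpat : (".py".toList = '.' :: "py".toList) ∧ (".ts".toList = '.' :: "ts".toList)
      ∧ (".tsx".toList = '.' :: "tsx".toList) ∧ (".js".toList = '.' :: "js".toList)
      ∧ (".jsx".toList = '.' :: "jsx".toList) ∧ (".md".toList = '.' :: "md".toList) := by decide
  show (if suffix == _ then true else _) = _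
  rw [hpat.1, hpat.2.1, hpat.2.2.1, hpat.2.2.2.1, hpat.2.2.2.2.1, hpat.2.2.2.2.2,
      hpy, hts, htsx, hjs, hjsx, hmd]
  rw [if_bool_or, if_bool_or, if_bool_or, if_bool_or, if_bool_or]
  have hsufeq : ∀ q : List Char, (q == PySem.Chars.lower T) = (suffix == q) := by
    intro q; rw [hsuf, Bool.eq_iff_iff, beq_iff_eq, beq_iff_eq]; exact eq_comm
  rw [hsufeq, hsufeq, hsufeq, hsufeq, hsufeq, hsufeq]
  simp only [elemCond, Bool.or_assoc]

theorem contains_addEntries (s : PySem.Set (List Char)) (ft : String) (suffix : List Char) :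
    PySem.Set.contains (addEntries s ft) suffix
      = (PySem.Set.contains s suffix
          || elemCond suffix ((PySem.Chars.lower ft.toList).dropWhile (· == '.'))) := by
  unfold addEntries
  rw [Bool.eq_iff_iff]
  dsimp only
  generalize (PySem.Chars.lower ft.toList).dropWhile (· == '.') = n
  simp only [PySem.Set.contains, List.contains_iff_mem, Bool.or_eq_true]
  split_ifs with h1 h2
  · simp only [beq_iff_eq] at h1
    rcases h1 with rfl | rfl <;> · simp [PySem.Set.mem_add, elemCond]; tauto
  · simp only [beq_iff_eq] at h2
    rcases h2 with rfl | rfl <;> · simp [PySem.Set.mem_add, elemCond]; tauto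
  · simp only [beq_iff_eq] at h1 h2
    simp only [PySem.Set.mem_add, elemCond, Bool.or_eq_true, Bool.and_eq_true, beq_iff_eq]
    constructor
    · rintro (h | rfl)
      · exact Or.inl h
      · exact Or.inr (Or.inl (Or.inl (Or.inl (Or.inl rfl))))
    · rintro (h | (((rfl | ⟨hpy, hsfx⟩) | ⟨hn', -⟩) | ⟨hn', -⟩) | ⟨hmd, hsfx⟩)
      · exact Or.inl h
      · exact Or.inr rfl
      · exact Or.inr (hsfx.trans hpy.symm)
      · exact absurd hn' h1
      · exact absurd hn' h2
      · exact Or.inr (hsfx.trans hmd.symm)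

theorem loop_set (X T suffix : List Char) (hT : '.' ∉ T)
    (hsuf : suffix = PySem.Chars.lower T) :
    ∀ (fts : List String) (s : PySem.Set (List Char)),
      PySem.Set.contains (fts.foldl addEntries s) suffix
        = (PySem.Set.contains s suffix || aLoop (X ++ '.' :: T) suffix fts) := by
  intro fts
  induction fts with
  | nil => intro s; simp [aLoop]
  | cons ft rest ih =>
    intro s
    rw [List.foldl_cons, ih, contains_addEntries, aLoop_cons X T suffix hT hsuf]
    cases PySem.Set.contains s suffix <;> simp

-- ===== VERDICT (by name: the statement is the Claim_ definition above) =====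
theorem matches_types_py_spec : Claim_equal_matches_types_py := by
  intro filename file_types _
  unfold Spec_matches_types_py matches_types_py matches_types_py_alt pyRsplitDot1
  cases hs : splitLastDot filename.toList with
  | none => simp
  | some p =>
    obtain ⟨h, t⟩ := p
    obtain ⟨hfl, hT⟩ := splitLastDot_spec _ _ _ hs
    simp only [List.length_cons, List.length_nil, List.getD, ne_eq, if_false,
      Nat.reduceAdd, not_true_eq_false, List.getElem?_cons_succ, List.getElem?_cons_zero,
      Option.getD_some]
    rw [hfl, loop_set h t _ hT rfl file_types PySem.Set.empty]
    simp [PySem.Set.empty, PySem.Set.contains]
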